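-- pv_equiv track=rewrite | github.com/pmoracho/pboletin | pboletin.py | conectar_horizontales
-- ===== SOURCE A (Python) =====
-- def conectar_horizontales(mylista, level=50):
--
--     verticales = [linea for linea in mylista if linea[0] == linea[2]]
--     verticales.sort(key=lambda x: abs(x[3]-x[1]))  # Ordeno ascendente, para que valgan los más largos
--
--     horizontales = [linea for linea in mylista if linea[1] == linea[3]]
--
--     xvert = {}
--     for i in [linea[0] for linea in verticales]:
--         for j in range(0, level):
--             xvert[i+j] = i
--             xvert[i-j] = i
--
--     for i, l in enumerate(horizontales):
--         horizontales[i][0] = xvert.get(horizontales[i][0], horizontales[i][0])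
--         horizontales[i][2] = xvert.get(horizontales[i][2], horizontales[i][2])
--
--     horizontales.extend(verticales)
--     return horizontales
-- ===== SOURCE B (Python) =====
-- # Non-mutating rewrite: verticals' xs reversed once, each endpoint snaps to the FIRST
-- # in-range x of that reversed list (= A's last-match), and fixed lines are rebuilt as new
-- # lists instead of mutated in place (A mutates mylista's horizontal lines; return value equal).
-- def conectar_horizontales(mylista, level=50):
--     verticales = sorted((l for l in mylista if l[0] == l[2]),
--                         key=lambda x: abs(x[3] - x[1]))
--     xs = [l[0] for l in verticales][::-1]
--
--     def snap(e):
--         return next((x for x in xs if abs(e - x) < level), e)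
--
--     def fix(l):
--         if l[1] == l[3]:
--             return [snap(l[0]), l[1], snap(l[2])] + l[3:]
--         return l
--
--     return [fix(l) for l in mylista if l[1] == l[3]] + [fix(l) for l in verticales]
-- ===== Notes on version B (the rewrite author's own statement) =====
-- stated objective: alternative
-- what changed: Replaces the xvert dict of enumerated offsets (table-build, lookup, in-place mutation) with a purely functional first-match scan over the reversed sorted verticals' x-coordinates per endpoint, rebuilding snapped lines as new lists; A mutates mylista's horizontal lines in place, B does not (return values equal).
import Mathlib
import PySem

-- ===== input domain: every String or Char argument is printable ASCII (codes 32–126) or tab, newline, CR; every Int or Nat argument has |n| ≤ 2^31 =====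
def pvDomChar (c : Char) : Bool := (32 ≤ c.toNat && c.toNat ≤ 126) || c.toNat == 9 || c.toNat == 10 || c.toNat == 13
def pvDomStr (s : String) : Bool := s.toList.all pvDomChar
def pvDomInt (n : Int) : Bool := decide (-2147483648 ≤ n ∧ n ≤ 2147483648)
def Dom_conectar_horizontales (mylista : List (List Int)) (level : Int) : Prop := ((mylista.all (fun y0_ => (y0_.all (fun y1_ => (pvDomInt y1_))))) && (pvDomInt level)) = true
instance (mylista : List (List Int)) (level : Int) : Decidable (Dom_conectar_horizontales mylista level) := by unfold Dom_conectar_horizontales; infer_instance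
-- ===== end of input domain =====

-- B replaces A's offset-table dict and in-place mutation by a purely functional first-match
-- scan over the reversed sorted verticals per endpoint, rebuilding snapped lines as new lists.
-- A mutates mylista's horizontal lines in place, B does not: equivalence is about the return value.

-- ===== PORT A =====
-- A mutates the horizontal lines in place; a line that is both vertical and horizontal is the
-- same Python object in both lists, so it appears updated in the verticales segment too —
-- the final map over verticales reproduces that aliasing effect explicitly.
def conectar_horizontales (mylista : List (List Int)) (level : Int) : List (List Int) :=
  let verticales := mylista.filter (fun l => PySem.List.pyGetD l 0 0 == PySem.List.pyGetD l 2 0)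
  let verticales := PySem.List.sorted verticales (fun x => |PySem.List.pyGetD x 3 0 - PySem.List.pyGetD x 1 0|) false
  let horizontales := mylista.filter (fun l => PySem.List.pyGetD l 1 0 == PySem.List.pyGetD l 3 0)
  let xvert := (verticales.map (fun l => PySem.List.pyGetD l 0 0)).foldl
      (fun d i => (PySem.List.pyRange 0 level 1).foldl
        (fun d j => (d.insert (i + j) i).insert (i - j) i) d)
      PySem.Dict.empty
  let upd := fun (l : List Int) =>
      let l := PySem.List.pySetD l 0 (xvert.getD (PySem.List.pyGetD l 0 0) (PySem.List.pyGetD l 0 0))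
      PySem.List.pySetD l 2 (xvert.getD (PySem.List.pyGetD l 2 0) (PySem.List.pyGetD l 2 0))
  horizontales.map upd
    ++ verticales.map (fun l => if PySem.List.pyGetD l 1 0 == PySem.List.pyGetD l 3 0 then upd l else l)

-- ===== PORT B =====
-- Source B's `[l[0] for l in verticales][::-1]` is List.reverse (slice [::-1] of a list is exact);
-- `next((x for x in xs if …), e)` is (xs.find? …).getD e; the rebuilt line
-- `[snap(l[0]), l[1], snap(l[2])] + l[3:]` is the cons/drop expression below.
def conectar_horizontales_alt (mylista : List (List Int)) (level : Int) : List (List Int) :=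
  let verticales := PySem.List.sorted
      (mylista.filter (fun l => PySem.List.pyGetD l 0 0 == PySem.List.pyGetD l 2 0))
      (fun x => |PySem.List.pyGetD x 3 0 - PySem.List.pyGetD x 1 0|) false
  let xs := (verticales.map (fun l => PySem.List.pyGetD l 0 0)).reverse
  let snap := fun (e : Int) => (xs.find? (fun x => decide (|e - x| < level))).getD e
  let fix := fun (l : List Int) =>
      if PySem.List.pyGetD l 1 0 == PySem.List.pyGetD l 3 0 then
        snap (PySem.List.pyGetD l 0 0) :: PySem.List.pyGetD l 1 0
          :: snap (PySem.List.pyGetD l 2 0) :: l.drop 3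
      else l
  (mylista.filter (fun l => PySem.List.pyGetD l 1 0 == PySem.List.pyGetD l 3 0)).map fix
    ++ verticales.map fix

-- ===== PRECONDITION & SPEC =====
-- Pre_ excludes lists containing a line of fewer than 4 entries, on which Python A raises IndexError.
def Pre_conectar_horizontales (mylista : List (List Int)) (level : Int) : Prop :=
  ∀ l ∈ mylista, 4 ≤ l.length
instance (mylista : List (List Int)) (level : Int) : Decidable (Pre_conectar_horizontales mylista level) := by unfold Pre_conectar_horizontales; infer_instance

def pvWitness_conectar_horizontales : List (List Int) × Int := ([[4, 2, 4, 2], [6, 0, 6, 9], [1, 7, 9, 7]], 3)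

def Spec_conectar_horizontales (mylista : List (List Int)) (level : Int) (out : List (List Int)) : Prop := out = conectar_horizontales_alt mylista level
instance (mylista : List (List Int)) (level : Int) (out : List (List Int)) : Decidable (Spec_conectar_horizontales mylista level out) := by unfold Spec_conectar_horizontales; infer_instance

-- ===== CLAIM (what is proved, stated in full; the proofs are below) =====
def Claim_equal_conectar_horizontales : Prop := ∀ (mylista : List (List Int)) (level : Int), Dom_conectar_horizontales mylista level → Pre_conectar_horizontales mylista level → Spec_conectar_horizontales mylista level (conectar_horizontales mylista level)

-- ===== LEMMAS AND PROOFS =====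

-- the inner offset loop of A inserts only value i: lookup = "was e covered?"
theorem pv_inner_get? (i e : Int) (js : List Int) (d : PySem.Dict Int Int) :
    (js.foldl (fun d j => (d.insert (i + j) i).insert (i - j) i) d).get? e
      = if (∃ j ∈ js, e = i + j ∨ e = i - j) then some i else d.get? e := by
  induction js generalizing d with
  | nil => simp
  | cons j js ih =>
    simp only [List.foldl_cons, ih]
    by_cases hjs : ∃ k ∈ js, e = i + k ∨ e = i - k
    · rw [if_pos hjs, if_pos]
      obtain ⟨k, hk, hke⟩ := hjs
      exact ⟨k, List.mem_cons_of_mem _ hk, hke⟩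
    · rw [if_neg hjs, PySem.Dict.get?_insert, PySem.Dict.get?_insert]
      by_cases h1 : e = i - j
      · rw [if_pos h1, if_pos ⟨j, List.mem_cons_self, Or.inr h1⟩]
      · rw [if_neg h1]
        by_cases h2 : e = i + j
        · rw [if_pos h2, if_pos ⟨j, List.mem_cons_self, Or.inl h2⟩]
        · rw [if_neg h2, if_neg]
          rintro ⟨k, hk, hke⟩
          rcases List.mem_cons.mp hk with rfl | hk
          · tauto
          · exact hjs ⟨k, hk, hke⟩

-- coverage by the offset range of A = the interval test used by B
theorem pv_cover_iff (i e level : Int) :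
    (∃ j ∈ PySem.List.pyRange 0 level 1, e = i + j ∨ e = i - j)
      ↔ |e - i| < level := by
  constructor
  · rintro ⟨j, hj, he⟩
    rw [PySem.List.mem_pyRange_one] at hj
    rcases he with rfl | rfl <;> simp [abs_lt] <;> omega
  · intro h
    rw [abs_lt] at h
    by_cases h0 : 0 ≤ e - i
    · exact ⟨e - i, by rw [PySem.List.mem_pyRange_one]; omega, Or.inl (by omega)⟩
    · exact ⟨i - e, by rw [PySem.List.mem_pyRange_one]; omega, Or.inr (by omega)⟩

-- the dict-building loop of A, read through get?, is a last-match scan over the xs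
theorem pv_outer_get? (e level : Int) (xs : List Int) (d : PySem.Dict Int Int) :
    ((xs.foldl (fun d i => (PySem.List.pyRange 0 level 1).foldl
        (fun d j => (d.insert (i + j) i).insert (i - j) i) d) d).get? e)
      = xs.foldl (fun (o : Option Int) x =>
          if |e - x| < level then some x else o) (d.get? e) := by
  induction xs generalizing d with
  | nil => rfl
  | cons x xs ih =>
    simp only [List.foldl_cons, ih, pv_inner_get?]
    congr 1
    exact if_congr (pv_cover_iff x e level) rfl rfl

-- a first match over the reversed list is the last match of a left fold
theorem pv_find_reverse (p : Int → Bool) (l : List Int) (e : Int) :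
    (l.find? p).getD e = l.reverse.foldl (fun r x => if p x then x else r) e := by
  induction l generalizing e with
  | nil => rfl
  | cons x l ih =>
    simp only [List.find?_cons, List.reverse_cons, List.foldl_append, List.foldl_cons,
      List.foldl_nil]
    by_cases h : p x
    · simp [h]
    · simp [h, ih]

-- Option.getD through A's last-match option scan is the plain fold of pv_find_reverse
theorem pv_option_fold (e level : Int) (xs : List Int) (o : Option Int) :
    (xs.foldl (fun (o : Option Int) x =>
        if |e - x| < level then some x else o) o).getD e
      = xs.foldl (fun r x =>
          if |e - x| < level then x else r) (o.getD e) := by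
  induction xs generalizing o with
  | nil => rfl
  | cons x xs ih =>
    simp only [List.foldl_cons, ih]
    split_ifs <;> rfl

-- A's table lookup equals B's first-match scan of the reversed xs, for every endpoint e
theorem pv_lookup_eq_snap (e level : Int) (xs : List Int) :
    ((xs.foldl (fun d i => (PySem.List.pyRange 0 level 1).foldl
        (fun d j => (d.insert (i + j) i).insert (i - j) i) d) PySem.Dict.empty).getD e e)
      = (xs.reverse.find? (fun x => decide (|e - x| < level))).getD e := by
  rw [PySem.Dict.getD_eq_get?_getD, pv_outer_get?, pv_option_fold,
    pv_find_reverse, List.reverse_reverse]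
  simp

-- setting index 0 does not change the value read at index 2
theorem pv_get2_set0 (l : List Int) (h : 4 ≤ l.length) (a : Int) :
    PySem.List.pyGetD (PySem.List.pySetD l 0 a) 2 0 = PySem.List.pyGetD l 2 0 := by
  match l with
  | x0 :: x1 :: x2 :: x3 :: t =>
    simp only [PySem.List.pySetD, PySem.List.pySet?, PySem.List.pyGetD, PySem.List.pyGet?,
      PySem.List.pyIdx?]
    split_ifs <;> simp_all <;> omega
  | [] | [_] | [_, _] | [_, _, _] => simp at h

-- rebuilding a line of length ≥ 4 as a fresh cons list equals A's two in-place updates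
theorem pv_setD_shape (l : List Int) (h : 4 ≤ l.length) (a b : Int) :
    PySem.List.pySetD (PySem.List.pySetD l 0 a) 2 b
      = a :: PySem.List.pyGetD l 1 0 :: b :: l.drop 3 := by
  match l with
  | x0 :: x1 :: x2 :: x3 :: t =>
    simp only [PySem.List.pySetD, PySem.List.pySet?, PySem.List.pyGetD, PySem.List.pyGet?,
      PySem.List.pyIdx?]
    split_ifs <;> simp_all <;> omega
  | [] | [_] | [_, _] | [_, _, _] => simp at h

-- ===== VERDICT (by name: the statement is the Claim_ definition above) =====
theorem conectar_horizontales_spec : Claim_equal_conectar_horizontales := by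
  intro mylista level _ hpre
  unfold Spec_conectar_horizontales conectar_horizontales conectar_horizontales_alt
  simp only [pv_lookup_eq_snap]
  congr 1
  · apply List.map_congr_left
    intro l hl
    have hlen : 4 ≤ l.length := hpre l (List.mem_of_mem_filter hl)
    have hcond := List.of_mem_filter hl
    rw [if_pos hcond, pv_get2_set0 l hlen, pv_setD_shape l hlen]
  · apply List.map_congr_left
    intro l hl
    have hmem : l ∈ mylista :=
      List.mem_of_mem_filter ((PySem.List.mem_sorted _ _ _ _).mp hl)
    have hlen : 4 ≤ l.length := hpre l hmem
    by_cases hcond : (PySem.List.pyGetD l 1 0 == PySem.List.pyGetD l 3 0) = true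
    · rw [if_pos hcond, if_pos hcond, pv_get2_set0 l hlen, pv_setD_shape l hlen]
    · rw [if_neg hcond, if_neg hcond]
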